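-- pv_equiv track=rewrite | github.com/Rupa-Rd/Voice-to-text | speech-to-text.py | words_separation
-- ===== SOURCE A (Python) =====
-- def words_separation(words_list) :
--     uninteresting_words = ["the", "a", "to", "if", "is", "it", "of", "and", "or", "an", "as", "for",
--                        "are", "was", "were", "be", "been", "being", "in", "have", "has", "had", "do", "does", "did",
--                        "but", "at", "by", "with", "from", "here", "when", "where", "how", "down", "all", "any",
--                        "both", "each", "few", "more", "some", "such", "no", "nor", "too", "very", "can", "will", "just",
--                        "into", "one",  "could", "would", "should", "here", "there", "about", "on", "upon",
--                        "so", "up", "down", "above", "under", "so", "then", "than", "may","."]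
--     numbers = '0123456789'
--     word1 = words_list.replace('.','').replace(',','')
--     word = word1.split(' ')
--     for i in word:
--         i.lower()
--         for j in i :
--             if j in numbers:
--                 yield j
--             else:
--
--                 yield i
--                 break
-- ===== SOURCE B (Python) =====
-- def words_separation(words_list):
--     # Different algorithm: one character-level state machine over the cleaned
--     # string (no split, no per-word scan), streaming digits of each word's
--     # leading-digit prefix and flushing the whole word at a boundary when a
--     # non-digit was seen.
--     word1 = words_list.replace('.', '').replace(',', '')
--     buf = []           # characters of the current word so far
--     pending = False    # current word contains a non-digit
--     for ch in word1:
--         if ch == ' ':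
--             if pending:
--                 yield ''.join(buf)
--             buf = []
--             pending = False
--         elif pending:
--             buf.append(ch)
--         elif ch in '0123456789':
--             yield ch
--             buf.append(ch)
--         else:
--             pending = True
--             buf.append(ch)
--     if pending:
--         yield ''.join(buf)
-- ===== Notes on version B (the rewrite author's own statement) =====
-- stated objective: alternative
-- what changed: B replaces A's split-into-words-then-rescan-each-word structure with a single character-level state machine over the cleaned string (buffer + pending flag, flushing at spaces and end), never calling split or scanning a word twice; the dead uninteresting_words list and the no-op i.lower() are dropped.
import Mathlib
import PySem

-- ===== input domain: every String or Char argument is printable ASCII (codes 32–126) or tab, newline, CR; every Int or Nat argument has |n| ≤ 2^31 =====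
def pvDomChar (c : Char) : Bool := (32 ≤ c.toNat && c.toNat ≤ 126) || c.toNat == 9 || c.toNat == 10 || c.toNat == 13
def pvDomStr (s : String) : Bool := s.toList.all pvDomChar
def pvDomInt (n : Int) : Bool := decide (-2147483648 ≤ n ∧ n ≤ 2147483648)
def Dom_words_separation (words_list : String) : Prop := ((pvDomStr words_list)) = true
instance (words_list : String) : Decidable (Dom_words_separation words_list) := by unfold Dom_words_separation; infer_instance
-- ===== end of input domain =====

-- B replaces A's split-then-per-word-scan with a single character-level state
-- machine over the cleaned string (alternative decomposition, same values).


def pvDigits : String := "0123456789"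

-- ===== PORT A =====
-- inner 'for j in i: …' loop with its break, yielding into a list
def wsInnerA (i : String) : List Char → List String
  | [] => []
  | j :: rest =>
    if PySem.Str.isIn (String.ofList [j]) pvDigits then String.ofList [j] :: wsInnerA i rest
    else [i]

def words_separation (words_list : String) : List String :=
  let word1 := PySem.Str.replace (PySem.Str.replace words_list "." "") "," ""
  let word := (PySem.Str.split? word1 " ").getD []  -- sep ≠ "", so split? is always some
  word.foldl (fun acc i => acc ++ wsInnerA i i.toList) []

-- ===== PORT B =====
-- one step of Source B's loop body; state = (yielded so far, buf, pending)
def wsStep (st : List String × List Char × Bool) (c : Char) : List String × List Char × Bool :=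
  if c = ' ' then
    ((if st.2.2 then st.1 ++ [String.ofList st.2.1] else st.1), [], false)
  else if st.2.2 then (st.1, st.2.1 ++ [c], true)
  else if pvDigits.toList.contains c then  -- ch in '0123456789' on a single char — exact
    (st.1 ++ [String.ofList [c]], st.2.1 ++ [c], false)
  else (st.1, st.2.1 ++ [c], true)

def words_separation_alt (words_list : String) : List String :=
  let word1 := PySem.Str.replace (PySem.Str.replace words_list "." "") "," ""
  let st := word1.toList.foldl wsStep ([], [], false)   -- for ch in word1
  if st.2.2 then st.1 ++ [String.ofList st.2.1] else st.1   -- final flush; ''.join(buf) of single chars = String.ofList buf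

-- ===== PRECONDITION & SPEC =====
def Spec_words_separation (words_list : String) (out : List String) : Prop := out = words_separation_alt words_list
instance (words_list : String) (out : List String) : Decidable (Spec_words_separation words_list out) := by unfold Spec_words_separation; infer_instance

-- ===== CLAIM (what is proved, stated in full; the proofs are below) =====
def Claim_equal_words_separation : Prop := ∀ (words_list : String), Dom_words_separation words_list → Spec_words_separation words_list (words_separation words_list)

-- ===== LEMMAS AND PROOFS =====
def dCh (c : Char) : Bool := pvDigits.toList.contains c

-- split at ' ' as a structural recursion: (first word, remaining words)
def splitSp : List Char → List Char × List (List Char)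
  | [] => ([], [])
  | c :: cs =>
    let p := splitSp cs
    if c = ' ' then ([], p.1 :: p.2) else (c :: p.1, p.2)

-- A's contribution of one word
def wsC (w : List Char) : List String :=
  (w.takeWhile dCh).map (fun c => String.ofList [c]) ++
    (if w.all dCh then [] else [String.ofList w])

-- contribution still to be emitted for the current word, given buffered prefix p
def wsR (p rest : List Char) : List String :=
  if p.all dCh then
    (rest.takeWhile dCh).map (fun c => String.ofList [c]) ++
      (if rest.all dCh then [] else [String.ofList (p ++ rest)])
  else [String.ofList (p ++ rest)]

def wsFinish (st : List String × List Char × Bool) : List String :=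
  if st.2.2 then st.1 ++ [String.ofList st.2.1] else st.1

theorem isIn_singleton_digits (c : Char) :
    PySem.Str.isIn (String.ofList [c]) pvDigits = pvDigits.toList.contains c := by
  simp [PySem.Str.isIn_eq]
  rw [Bool.eq_iff_iff, PySem.Chars.isIn_iff_infix]
  constructor
  · intro h; exact decide_eq_true (h.subset (List.mem_singleton_self c))
  · intro h
    obtain ⟨s, t, heq⟩ := List.append_of_mem (of_decide_eq_true h)
    rw [heq]
    exact ⟨s, t, by simp⟩

theorem wsInnerA_eq (w : List Char) : wsInnerA (String.ofList w) w = wsC w := by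
  have key : ∀ (i : String) (cs : List Char), wsInnerA i cs =
      (cs.takeWhile dCh).map (fun c => String.ofList [c]) ++
        (if cs.all dCh then [] else [i]) := by
    intro i cs
    induction cs with
    | nil => simp [wsInnerA]
    | cons j rest ih =>
      simp only [wsInnerA, isIn_singleton_digits]
      by_cases hj : j ∈ pvDigits.toList
      · simp [dCh, hj, ih]
      · simp [dCh, hj]
  exact key _ w

theorem splitOn_go_eq (fuel : Nat) (l cur : List Char) (acc : List (List Char))
    (h : l.length < fuel) :
    PySem.Chars.splitOn.go [' '] fuel l cur acc =
      acc.reverse ++ (cur.reverse ++ (splitSp l).1) :: (splitSp l).2 := by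
  induction fuel generalizing l cur acc with
  | zero => omega
  | succ fuel ih =>
    cases l with
    | nil => simp [PySem.Chars.splitOn.go, splitSp]
    | cons c rest =>
      simp only [PySem.Chars.splitOn.go]
      by_cases hc : c = ' '
      · subst hc
        rw [if_pos (by simp [List.isPrefixOf])]
        rw [ih _ _ _ (by simpa using Nat.lt_of_succ_lt_succ h)]
        simp [splitSp]
      · rw [if_neg (by simp [List.isPrefixOf]; exact fun h' => hc h'.symm)]
        rw [ih _ _ _ (by simpa using Nat.lt_of_succ_lt_succ h)]
        simp [splitSp, hc]

theorem splitOn_eq (l : List Char) :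
    PySem.Chars.splitOn l [' '] = (splitSp l).1 :: (splitSp l).2 := by
  rw [PySem.Chars.splitOn, splitOn_go_eq _ _ _ _ (Nat.lt_succ_self _)]
  simp
theorem A_eq (s : String) :
    words_separation s =
      ((splitSp (PySem.Str.replace (PySem.Str.replace s "." "") "," "").toList).1 ::
        (splitSp (PySem.Str.replace (PySem.Str.replace s "." "") "," "").toList).2).flatMap wsC := by
  simp only [words_separation, PySem.Str.split?, PySem.Chars.split?]
  rw [if_neg (by decide)]
  simp only [Option.map_some, Option.getD_some]
  rw [show (" " : String).toList = [' '] from rfl, splitOn_eq]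
  rw [PySem.List.foldl_append_eq_flatMap]
  simp only [List.nil_append, List.flatMap_map]
  congr 1
  funext w
  simp only [String.toList_ofList]
  exact wsInnerA_eq w
theorem machine_spec (cs : List Char) : ∀ (p : List Char) (out : List String),
    wsFinish (cs.foldl wsStep (out, p, !(p.all dCh))) =
      out ++ wsR p (splitSp cs).1 ++ ((splitSp cs).2).flatMap wsC := by
  induction cs with
  | nil =>
    intro p out
    by_cases hp : p.all dCh <;> simp [wsFinish, wsR, splitSp, hp]
  | cons c cs ih =>
    intro p out
    simp only [List.foldl_cons]
    by_cases hc : c = ' '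
    · subst hc
      have hst : wsStep (out, p, !p.all dCh) ' ' =
          ((if !p.all dCh then out ++ [String.ofList p] else out), [], !([].all dCh)) := by
        simp [wsStep]
      rw [hst, ih]
      by_cases hp : p.all dCh <;>
        simp [splitSp, wsR, wsC, hp, List.append_assoc]
    · by_cases hp : p.all dCh
      · by_cases hd : dCh c
        · have hst : wsStep (out, p, !p.all dCh) c =
              (out ++ [String.ofList [c]], p ++ [c], !((p ++ [c]).all dCh)) := by
            have hd' : c ∈ pvDigits.toList := by simpa [dCh] using hd
            simp [wsStep, hc, hp, hd', hd, List.all_append]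
          rw [hst, ih]
          by_cases hrest : ((splitSp cs).1).all dCh <;>
            simp [splitSp, hc, wsR, hp, hd, hrest, List.all_append,
              List.append_assoc]
        · have hst : wsStep (out, p, !p.all dCh) c =
              (out, p ++ [c], !((p ++ [c]).all dCh)) := by
            have hd' : c ∉ pvDigits.toList := by simpa [dCh] using hd
            simp [wsStep, hc, hp, hd', List.all_append, (by simpa [dCh] using hd' : dCh c = false)]
          rw [hst, ih]
          simp [splitSp, hc, wsR, hp, hd, List.all_append,
            List.append_assoc]
      · have hst : wsStep (out, p, !p.all dCh) c =
            (out, p ++ [c], !((p ++ [c]).all dCh)) := by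
          simp [wsStep, hc, hp, List.all_append]
        rw [hst, ih]
        simp [splitSp, hc, wsR, hp, List.all_append, List.append_assoc]
theorem B_eq (s : String) :
    words_separation_alt s =
      ((splitSp (PySem.Str.replace (PySem.Str.replace s "." "") "," "").toList).1 ::
        (splitSp (PySem.Str.replace (PySem.Str.replace s "." "") "," "").toList).2).flatMap wsC := by
  have h := machine_spec (PySem.Str.replace (PySem.Str.replace s "." "") "," "").toList [] []
  simp only [List.all_nil, Bool.not_true, wsFinish] at h
  simp only [words_separation_alt]
  have hR : ∀ (a : List Char), wsR [] a = wsC a := fun a => by simp [wsR, wsC]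
  rw [h, List.flatMap_cons, List.nil_append, hR]

theorem words_separation_spec : Claim_equal_words_separation := by
  intro w _
  unfold Spec_words_separation
  rw [A_eq, B_eq]
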